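-- pv_equiv track=rewrite | github.com/weekyear/algorithm | 2021/05/09/summer_coding_02.py | solution
-- ===== SOURCE A (Python) =====
-- def solution(t, r):
--     lst = []
--     final_client = 0
--     for i in range(len(t)):
--         lst.append((t[i], r[i], i))
--         if t[i] > final_client:
--             final_client = t[i]
--
--     lst.sort(key=lambda l:(l[0], l[1]))
--
--     time = 0
--     Q = []
--     answer = []
--     while Q or lst:
--         while True:
--             if len(lst) and lst[0][0] <= time:
--                 Q.append(lst.pop(0))
--             else:
--                 break
--         Q.sort(key=lambda l:(l[1], l[0]))
--         if len(Q):
--             answer.append(Q.pop(0)[2])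
--         time += 1
--
--     return answer
-- ===== SOURCE B (Python) =====
-- def solution(t, r):
--     # One pass per job, no sorting: keep the unprocessed indices, at each step
--     # scan the arrived ones for the (r, t, index)-minimal job, and when none
--     # has arrived jump the clock straight to the next arrival.
--     remaining = list(range(len(t)))
--     time = 0
--     answer = []
--     while remaining:
--         arrived = [i for i in remaining if t[i] <= time]
--         if arrived:
--             best = min(arrived, key=lambda i: (r[i], t[i]))
--             answer.append(best)
--             remaining = [i for i in remaining if i != best]
--             time += 1
--         else:
--             time = min(t[i] for i in remaining)
--     return answer
-- ===== Notes on version B (the rewrite author's own statement) =====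
-- stated objective: alternative
-- what changed: B keeps no queue and never sorts: it holds the unprocessed indices, at each step scans the arrived ones for the (r,t)-minimal job (ties by index), and when nothing has arrived it jumps the clock straight to the next arrival instead of ticking one second at a time; A instead pre-sorts the jobs, transfers an arrived prefix into a queue it re-sorts every tick, and idles tick by tick.
import Mathlib
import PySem

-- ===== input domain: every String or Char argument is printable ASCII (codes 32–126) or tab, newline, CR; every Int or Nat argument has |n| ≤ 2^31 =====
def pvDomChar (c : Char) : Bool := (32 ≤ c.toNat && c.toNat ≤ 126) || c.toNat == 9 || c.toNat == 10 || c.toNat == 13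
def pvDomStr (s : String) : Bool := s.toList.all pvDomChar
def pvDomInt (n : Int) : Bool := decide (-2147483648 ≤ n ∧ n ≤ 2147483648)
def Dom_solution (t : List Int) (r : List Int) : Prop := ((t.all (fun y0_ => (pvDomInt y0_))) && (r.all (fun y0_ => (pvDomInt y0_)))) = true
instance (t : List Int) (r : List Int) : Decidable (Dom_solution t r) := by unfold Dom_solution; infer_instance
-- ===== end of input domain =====

-- B is an ALTERNATIVE implementation (no sorting, direct min-scan, clock jumps over idle time),
-- proved to return exactly A's value whenever A returns (Pre_: r is at least as long as t).

-- ===== PORT A =====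
-- the two 'while' loops of A, as one well-founded recursion: transfer the arrived
-- prefix of lst to Q, sort Q by (r, t), pop its head if any, advance the clock by 1
def solutionLoop (lst Q : List (Int × Int × Int)) (time : Int) : List Int :=
  if h : Q = [] ∧ lst = [] then []
  else
    let rest := lst.dropWhile (fun j => j.1 ≤ time)
    match hQ : PySem.List.sorted2 (Q ++ lst.takeWhile (fun j => j.1 ≤ time)) (fun j => j.2.1) (fun j => j.1) with
    | [] => solutionLoop rest [] (time + 1)
    | q :: qs => q.2.2 :: solutionLoop rest qs (time + 1)
termination_by (lst.length + Q.length, (match lst with | [] => 0 | l :: _ => (l.1 - time).toNat))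
decreasing_by
  · -- sorted2 (Q ++ taken) = [] : Q and the taken prefix are empty, only time moves
    have hperm := PySem.List.sorted2_perm (Q ++ lst.takeWhile (fun j => j.1 ≤ time)) (fun j => j.2.1) (fun j => j.1) false
    rw [hQ] at hperm
    have hnil : Q ++ lst.takeWhile (fun j => decide (j.1 ≤ time)) = [] := hperm.nil_eq.symm
    have hQnil : Q = [] := by
      cases hq : Q with
      | nil => rfl
      | cons a b => rw [hq] at hnil; simp at hnil
    have htake : lst.takeWhile (fun j => decide (j.1 ≤ time)) = [] := by
      cases hq : lst.takeWhile (fun j => decide (j.1 ≤ time)) with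
      | nil => rfl
      | cons a b => rw [hq] at hnil; simp at hnil
    have hlst : lst ≠ [] := fun hl => h ⟨hQnil, hl⟩
    subst hQnil
    cases hl : lst with
    | nil => exact absurd hl hlst
    | cons l ls =>
      subst hl
      rw [List.takeWhile_cons] at htake
      have hhead : ¬ (l.1 ≤ time) := by
        intro hle; simp [hle] at htake
      have hdrop : List.dropWhile (fun j => decide (j.1 ≤ time)) (l :: ls) = l :: ls := by
        rw [List.dropWhile_cons]
        simp [hhead]
      rw [hdrop]
      refine Prod.Lex.right _ ?_
      show (l.1 - (time + 1)).toNat < (l.1 - time).toNat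
      omega
  · -- an element was popped: total number of jobs decreases
    have hperm := PySem.List.sorted2_perm (Q ++ lst.takeWhile (fun j => j.1 ≤ time)) (fun j => j.2.1) (fun j => j.1) false
    rw [hQ] at hperm
    have hlen := hperm.length_eq
    have hsum : (lst.takeWhile (fun j => decide (j.1 ≤ time))).length + (lst.dropWhile (fun j => decide (j.1 ≤ time))).length = lst.length := by
      rw [← List.length_append, List.takeWhile_append_dropWhile]
    apply Prod.Lex.left
    simp only [List.length_append, List.length_cons] at hlen ⊢
    omega

-- the first loop of A: build lst (and the unused final_client) index by index
def solutionBuild (t r : List Int) : List (Int × Int × Int) × Int :=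
  (PySem.List.pyRange 0 (PySem.List.len t) 1).foldl
    (fun acc i =>
      (acc.1 ++ [(PySem.List.pyGetD t i 0, PySem.List.pyGetD r i 0, i)],
       if PySem.List.pyGetD t i 0 > acc.2 then PySem.List.pyGetD t i 0 else acc.2))
    ([], 0)

def solution (t : List Int) (r : List Int) : List Int :=
  solutionLoop (PySem.List.sorted2 (solutionBuild t r).1 (fun j => j.1) (fun j => j.2.1)) [] 0

-- ===== PORT B =====
-- lemmas the port needs for termination (cited in its decreasing_by proof)
theorem pvFoldlPick_some_mem {α : Type} (f : Option α → α → Option α)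
    (hf : ∀ a x, ∃ y, f (some a) x = some y ∧ (y = a ∨ y = x)) :
    ∀ (xs : List α) (a m : α), xs.foldl f (some a) = some m → m = a ∨ m ∈ xs := by
  intro xs
  induction xs with
  | nil => intro a m h; simp at h; exact Or.inl h.symm
  | cons x xs ih =>
    intro a m h
    obtain ⟨y, hy, hor⟩ := hf a x
    simp only [List.foldl_cons, hy] at h
    rcases ih y m h with h1 | h2
    · rcases hor with h3 | h3
      · exact Or.inl (h1.trans h3)
      · exact Or.inr (by simp [h1, h3])
    · exact Or.inr (List.mem_cons_of_mem _ h2)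

theorem pvMin2?_cases {α : Type} (xs : List α) (k1 k2 : α → Int) :
    (xs = [] ∧ PySem.List.min2? xs k1 k2 = none) ∨ ∃ m, PySem.List.min2? xs k1 k2 = some m ∧ m ∈ xs := by
  cases xs with
  | nil => exact Or.inl ⟨rfl, rfl⟩
  | cons x xs =>
    right
    have hstep : ∀ (a y : α), ∃ z, (fun (acc : Option α) (v : α) =>
        match acc with
        | none => some v
        | some m => if (decide (k1 v < k1 m) || !decide (k1 m < k1 v) && decide (k2 v < k2 m)) = true then some v else some m) (some a) y
        = some z ∧ (z = a ∨ z = y) := by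
      intro a y
      by_cases hc : (decide (k1 y < k1 a) || !decide (k1 a < k1 y) && decide (k2 y < k2 a)) = true
      · exact ⟨y, by simp [hc], Or.inr rfl⟩
      · exact ⟨a, by simp [hc], Or.inl rfl⟩
    have hfold : PySem.List.min2? (x :: xs) k1 k2 = xs.foldl (fun acc v =>
        match acc with
        | none => some v
        | some m => if (decide (k1 v < k1 m) || !decide (k1 m < k1 v) && decide (k2 v < k2 m)) = true then some v else some m) (some x) := rfl
    cases hm : xs.foldl (fun acc v =>
        match acc with
        | none => some v
        | some m => if (decide (k1 v < k1 m) || !decide (k1 m < k1 v) && decide (k2 v < k2 m)) = true then some v else some m) (some x) with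
    | none =>
      exfalso
      have hne : ∀ (ys : List α) (a : α), ys.foldl (fun acc v =>
          match acc with
          | none => some v
          | some m => if (decide (k1 v < k1 m) || !decide (k1 m < k1 v) && decide (k2 v < k2 m)) = true then some v else some m) (some a) ≠ none := by
        intro ys
        induction ys with
        | nil => intro a h; simp at h
        | cons y ys ih =>
          intro a h
          obtain ⟨z, hz, _⟩ := hstep a y
          simp only [List.foldl_cons, hz] at h
          exact ih z h
      exact hne xs x hm
    | some m =>
      refine ⟨m, by rw [hfold, hm], ?_⟩
      rcases pvFoldlPick_some_mem _ hstep xs x m hm with h | h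
      · simp [h]
      · exact List.mem_cons_of_mem _ h

-- B: scan the unprocessed indices each step, pick the (r,t)-minimal arrived one,
-- and when nothing has arrived jump the clock to the next arrival
def solutionAltLoop (t r : List Int) (remaining : List Int) (time : Int) : List Int :=
  if hrem : remaining = [] then []
  else
    match hA : PySem.List.min2? (remaining.filter (fun i => PySem.List.pyGetD t i 0 ≤ time))
        (fun i => PySem.List.pyGetD r i 0) (fun i => PySem.List.pyGetD t i 0) with
    | some best => best :: solutionAltLoop t r (remaining.filter (fun i => i ≠ best)) (time + 1)
    | none =>
      match hm : PySem.List.min? (remaining.map (fun i => PySem.List.pyGetD t i 0)) (fun x => x) with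
      | some m => solutionAltLoop t r remaining m
      | none => []   -- unreachable: remaining ≠ []
termination_by (remaining.length,
  (match PySem.List.min? (remaining.map (fun i => PySem.List.pyGetD t i 0)) (fun x => x) with
   | some m => (m - time).toNat | none => 0))
decreasing_by
  · -- a job got processed
    apply Prod.Lex.left
    have hmain : (remaining.filter (fun i => decide (i ≠ best))).length < remaining.length := by
      rcases pvMin2?_cases (remaining.filter (fun i => PySem.List.pyGetD t i 0 ≤ time))
          (fun i => PySem.List.pyGetD r i 0) (fun i => PySem.List.pyGetD t i 0) with ⟨_, hnone⟩ | ⟨m, hsome, hmem⟩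
      · rw [hA] at hnone; exact absurd hnone (by simp)
      · rw [hA] at hsome
        injection hsome with hsome
        subst hsome
        have hbest : best ∈ remaining := List.mem_of_mem_filter hmem
        rcases Nat.lt_or_ge (remaining.filter (fun i => decide (i ≠ best))).length remaining.length with hlt | hge
        · exact hlt
        · exfalso
          have heq : remaining.filter (fun i => decide (i ≠ best)) = remaining :=
            (List.filter_sublist).eq_of_length_le hge
          have hmem2 : best ∈ remaining.filter (fun i => decide (i ≠ best)) := by
            rw [heq]; exact hbest
          have := List.of_mem_filter hmem2
          simp at this
    rw [List.unattach_filter (g := fun i => decide (i ≠ best)) (hf := fun x h => rfl), List.unattach_attach]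
    exact hmain
  · -- idle: the clock jumps to the next arrival m, with time < m
    refine Prod.Lex.right _ ?_
    simp only [hm]
    have hmmem : m ∈ remaining.map (fun i => PySem.List.pyGetD t i 0) := PySem.List.min?_mem hm
    obtain ⟨i, hi, hit⟩ := List.mem_map.mp hmmem
    have hgt : time < PySem.List.pyGetD t i 0 := by
      by_contra hle
      have hmemf : i ∈ remaining.filter (fun i => decide (PySem.List.pyGetD t i 0 ≤ time)) :=
        List.mem_filter.mpr ⟨hi, by simpa using (by omega : PySem.List.pyGetD t i 0 ≤ time)⟩
      rcases pvMin2?_cases (remaining.filter (fun i => PySem.List.pyGetD t i 0 ≤ time))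
          (fun i => PySem.List.pyGetD r i 0) (fun i => PySem.List.pyGetD t i 0) with ⟨hnil, _⟩ | ⟨m', hsome, _⟩
      · rw [hnil] at hmemf; simp at hmemf
      · rw [hA] at hsome; exact absurd hsome (by simp)
    have hm2 : time < m := by
      rw [← hit]
      simpa using hgt
    simp only [sub_self, Int.toNat_zero]
    exact Nat.pos_of_ne_zero (fun h0 => by
      have := Int.toNat_eq_zero.mp h0
      omega)

def solution_alt (t : List Int) (r : List Int) : List Int :=
  solutionAltLoop t r (PySem.List.pyRange 0 (PySem.List.len t) 1) 0

-- ===== PRECONDITION & SPEC =====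
-- Pre_ excludes exactly the inputs where Python A raises IndexError (r shorter than t); B raises there too.
def Pre_solution (t : List Int) (r : List Int) : Prop := t.length ≤ r.length
instance (t : List Int) (r : List Int) : Decidable (Pre_solution t r) := by unfold Pre_solution; infer_instance
def pvWitness_solution : List Int × List Int := ([2, 0, 0, 5], [1, 2, 1, 0])

def Spec_solution (t : List Int) (r : List Int) (out : List Int) : Prop := out = solution_alt t r
instance (t : List Int) (r : List Int) (out : List Int) : Decidable (Spec_solution t r out) := by unfold Spec_solution; infer_instance

-- ===== CLAIM (what is proved, stated in full; the proofs are below) =====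
def Claim_equal_solution : Prop := ∀ (t : List Int) (r : List Int), Dom_solution t r → Pre_solution t r → Spec_solution t r (solution t r)

-- ===== LEMMAS AND PROOFS =====

-- job record of index i: (arrival, priority, index)
def pvJ (t r : List Int) (i : Int) : Int × Int × Int :=
  (PySem.List.pyGetD t i 0, PySem.List.pyGetD r i 0, i)

-- strict lexicographic order on two keys, then a third tie-breaking key
def pvLt3 {α : Type} (k1 k2 k3 : α → Int) (a b : α) : Prop :=
  k1 a < k1 b ∨ (k1 a = k1 b ∧ (k2 a < k2 b ∨ (k2 a = k2 b ∧ k3 a < k3 b)))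

-- the loop invariant tying A's state (lst, Q, time) to B's state (rem, time)
def pvInv (t r : List Int) (lst Q : List (Int × Int × Int)) (rem : List Int) (time : Int) : Prop :=
  (lst ++ Q).Perm (rem.map (pvJ t r)) ∧
  lst.Pairwise (pvLt3 (fun j => j.1) (fun j => j.2.1) (fun j => j.2.2)) ∧
  Q.Pairwise (pvLt3 (fun j => j.2.1) (fun j => j.1) (fun j => j.2.2)) ∧
  (∀ q ∈ Q, q.1 < time) ∧
  (Q = [] ∨ ∀ l ∈ lst, time ≤ l.1) ∧
  rem.Pairwise (· < ·)

-- strict two-key lexicographic order (the order sorted2/min2? compare by)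
def pvLt2 {α : Type} (k1 k2 : α → Int) (a b : α) : Prop :=
  k1 a < k1 b ∨ (k1 a = k1 b ∧ k2 a < k2 b)

-- proof measure: two steps per unprocessed job, plus one for a pending idle jump
def pvNu (t : List Int) (rem : List Int) (time : Int) : Nat :=
  2 * rem.length + (if rem.filter (fun i => decide (PySem.List.pyGetD t i 0 ≤ time)) = [] then 1 else 0)

theorem pvBefore_true {α : Type} (k1 k2 : α → Int) (a b : α) :
    (decide (k1 a < k1 b) || !decide (k1 b < k1 a) && decide (k2 a < k2 b)) = true ↔ pvLt2 k1 k2 a b := by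
  unfold pvLt2
  simp only [Bool.or_eq_true, Bool.and_eq_true, Bool.not_eq_eq_eq_not, Bool.not_true,
    decide_eq_true_eq, decide_eq_false_iff_not]
  omega

theorem pvLt3_trans {α : Type} (k1 k2 k3 : α → Int) (a b c : α)
    (h1 : pvLt3 k1 k2 k3 a b) (h2 : pvLt3 k1 k2 k3 b c) : pvLt3 k1 k2 k3 a c := by
  unfold pvLt3 at *
  omega

theorem pvInsertBy_nil {α : Type} (bf : α → α → Bool) (x : α) :
    PySem.List.insertBy bf x [] = [x] := rfl

theorem pvInsertBy_cons {α : Type} (bf : α → α → Bool) (x y : α) (ys : List α) :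
    PySem.List.insertBy bf x (y :: ys) =
      if bf x y then x :: y :: ys else y :: PySem.List.insertBy bf x ys := rfl

theorem pvInsertBy_pairwise {α : Type} (k1 k2 k3 : α → Int) (x : α) (ys : List α)
    (h1 : ys.Pairwise (pvLt3 k1 k2 k3))
    (h2 : ∀ e ∈ ys, k1 e = k1 x → k2 e = k2 x → k3 e < k3 x) :
    (PySem.List.insertBy (fun a b => decide (k1 a < k1 b) || !decide (k1 b < k1 a) && decide (k2 a < k2 b)) x ys).Pairwise
      (pvLt3 k1 k2 k3) := by
  induction ys with
  | nil => simp [pvInsertBy_nil]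
  | cons y ys ih =>
    rw [List.pairwise_cons] at h1
    obtain ⟨hy, hys⟩ := h1
    rw [pvInsertBy_cons]
    by_cases hb : (decide (k1 x < k1 y) || !decide (k1 y < k1 x) && decide (k2 x < k2 y)) = true
    · rw [if_pos hb]
      have hxy : pvLt3 k1 k2 k3 x y := by
        have h := (pvBefore_true k1 k2 x y).mp hb
        unfold pvLt2 at h
        unfold pvLt3
        omega
      refine List.pairwise_cons.mpr ⟨?_, List.pairwise_cons.mpr ⟨hy, hys⟩⟩
      intro z hz
      rcases List.mem_cons.mp hz with rfl | hz'
      · exact hxy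
      · exact pvLt3_trans k1 k2 k3 x y z hxy (hy z hz')
    · rw [if_neg hb]
      have hyx : pvLt3 k1 k2 k3 y x := by
        have hb' : ¬ pvLt2 k1 k2 x y := fun hp => hb ((pvBefore_true k1 k2 x y).mpr hp)
        have h2y : k1 y = k1 x → k2 y = k2 x → k3 y < k3 x := h2 y (List.mem_cons_self)
        unfold pvLt2 at hb'
        unfold pvLt3
        omega
      refine List.pairwise_cons.mpr ⟨?_, ih hys (fun e he => h2 e (List.mem_cons_of_mem _ he))⟩
      intro z hz
      rcases (PySem.List.mem_insertBy _ x z ys).mp hz with rfl | hz'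
      · exact hyx
      · exact hy z hz'

theorem pvFoldlInsert_pairwise {α : Type} (k1 k2 k3 : α → Int) :
    ∀ (xs acc : List α),
      acc.Pairwise (pvLt3 k1 k2 k3) →
      (∀ e ∈ acc, ∀ v ∈ xs, k1 e = k1 v → k2 e = k2 v → k3 e < k3 v) →
      xs.Pairwise (fun a b => k1 a = k1 b → k2 a = k2 b → k3 a < k3 b) →
      (xs.foldl (fun acc x => PySem.List.insertBy (fun a b => decide (k1 a < k1 b) || !decide (k1 b < k1 a) && decide (k2 a < k2 b)) x acc) acc).Pairwise
        (pvLt3 k1 k2 k3) := by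
  intro xs
  induction xs with
  | nil => intro acc h1 _ _; simpa using h1
  | cons x xs ih =>
    intro acc h1 h2 h3
    rw [List.pairwise_cons] at h3
    obtain ⟨hx, hxs⟩ := h3
    simp only [List.foldl_cons]
    refine ih _ ?_ ?_ hxs
    · exact pvInsertBy_pairwise k1 k2 k3 x acc h1 (fun e he => h2 e he x (List.mem_cons_self))
    · intro e he v hv
      rcases (PySem.List.mem_insertBy _ x e acc).mp he with rfl | he'
      · exact hx v hv
      · exact h2 e he' v (List.mem_cons_of_mem _ hv)

theorem pvSorted2_pairwise {α : Type} (k1 k2 k3 : α → Int) (xs : List α)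
    (h : xs.Pairwise (fun a b => k1 a = k1 b → k2 a = k2 b → k3 a < k3 b)) :
    (PySem.List.sorted2 xs k1 k2).Pairwise (pvLt3 k1 k2 k3) := by
  have he : PySem.List.sorted2 xs k1 k2 =
      xs.foldl (fun acc x => PySem.List.insertBy (fun a b => decide (k1 a < k1 b) || !decide (k1 b < k1 a) && decide (k2 a < k2 b)) x acc) [] := rfl
  rw [he]
  exact pvFoldlInsert_pairwise k1 k2 k3 xs [] List.Pairwise.nil (by simp) h

-- min2? as a fold, and its "first minimum" characterisation
def pvStep {α : Type} (k1 k2 : α → Int) (acc : Option α) (x : α) : Option α :=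
  match acc with
  | none => some x
  | some m => if (decide (k1 x < k1 m) || !decide (k1 m < k1 x) && decide (k2 x < k2 m)) = true then some x else some m

theorem pvMin2?_eq_foldl {α : Type} (k1 k2 : α → Int) (xs : List α) :
    PySem.List.min2? xs k1 k2 = xs.foldl (pvStep k1 k2) none := rfl

theorem pvStep_lt {α : Type} (k1 k2 : α → Int) (m x : α) (h : pvLt2 k1 k2 x m) :
    pvStep k1 k2 (some m) x = some x := by
  have he : pvStep k1 k2 (some m) x =
      if (decide (k1 x < k1 m) || !decide (k1 m < k1 x) && decide (k2 x < k2 m)) = true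
      then some x else some m := rfl
  rw [he, if_pos ((pvBefore_true k1 k2 x m).mpr h)]

theorem pvStep_not_lt {α : Type} (k1 k2 : α → Int) (m x : α) (h : ¬ pvLt2 k1 k2 x m) :
    pvStep k1 k2 (some m) x = some m := by
  have he : pvStep k1 k2 (some m) x =
      if (decide (k1 x < k1 m) || !decide (k1 m < k1 x) && decide (k2 x < k2 m)) = true
      then some x else some m := rfl
  rw [he, if_neg (fun hb => h ((pvBefore_true k1 k2 x m).mp hb))]

theorem pvFoldlStep_keep {α : Type} (k1 k2 : α → Int) :
    ∀ (ys : List α) (a : α), (∀ y ∈ ys, ¬ pvLt2 k1 k2 y a) →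
      ys.foldl (pvStep k1 k2) (some a) = some a := by
  intro ys
  induction ys with
  | nil => intro a _; rfl
  | cons y ys ih =>
    intro a h
    rw [List.foldl_cons, pvStep_not_lt k1 k2 a y (h y (List.mem_cons_self))]
    exact ih a (fun z hz => h z (List.mem_cons_of_mem _ hz))

theorem pvFoldlStep_dominated {α : Type} (k1 k2 : α → Int) (b : α) :
    ∀ (pre : List α) (a : α), pvLt2 k1 k2 b a → (∀ p ∈ pre, pvLt2 k1 k2 b p) →
      ∃ a', pre.foldl (pvStep k1 k2) (some a) = some a' ∧ pvLt2 k1 k2 b a' := by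
  intro pre
  induction pre with
  | nil => intro a ha _; exact ⟨a, rfl, ha⟩
  | cons p pre ih =>
    intro a ha hpre
    by_cases hc : (decide (k1 p < k1 a) || !decide (k1 a < k1 p) && decide (k2 p < k2 a)) = true
    · rw [List.foldl_cons, pvStep_lt k1 k2 a p ((pvBefore_true k1 k2 p a).mp hc)]
      exact ih p (hpre p (List.mem_cons_self)) (fun z hz => hpre z (List.mem_cons_of_mem _ hz))
    · rw [List.foldl_cons, pvStep_not_lt k1 k2 a p (fun hp => hc ((pvBefore_true k1 k2 p a).mpr hp))]
      exact ih a ha (fun z hz => hpre z (List.mem_cons_of_mem _ hz))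

theorem pvMin2?_first {α : Type} (k1 k2 : α → Int) (pre suf : List α) (b : α)
    (hpre : ∀ p ∈ pre, pvLt2 k1 k2 b p) (hsuf : ∀ s ∈ suf, ¬ pvLt2 k1 k2 s b) :
    PySem.List.min2? (pre ++ b :: suf) k1 k2 = some b := by
  rw [pvMin2?_eq_foldl, List.foldl_append]
  cases pre with
  | nil =>
    rw [List.foldl_nil, List.foldl_cons]
    exact pvFoldlStep_keep k1 k2 suf b hsuf
  | cons p0 pre' =>
    obtain ⟨a', ha', hba'⟩ := pvFoldlStep_dominated k1 k2 b pre' p0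
      (hpre p0 (List.mem_cons_self)) (fun p hp => hpre p (List.mem_cons_of_mem _ hp))
    have hinner : (p0 :: pre').foldl (pvStep k1 k2) none = some a' := by
      rw [List.foldl_cons, show pvStep k1 k2 none p0 = some p0 from rfl, ha']
    rw [hinner, List.foldl_cons, pvStep_lt k1 k2 a' b hba']
    exact pvFoldlStep_keep k1 k2 suf b hsuf

-- on a list whose elements satisfy "later implies earlier" for p, takeWhile/dropWhile are filters
theorem pvTW {α : Type} (p : α → Bool) :
    ∀ (l : List α), l.Pairwise (fun a b => p b = true → p a = true) →
      l.takeWhile p = l.filter p ∧ l.dropWhile p = l.filter (fun a => !p a) := by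
  intro l
  induction l with
  | nil => intro _; simp
  | cons a l ih =>
    intro h
    rw [List.pairwise_cons] at h
    obtain ⟨h1, h2⟩ := h
    obtain ⟨iht, ihd⟩ := ih h2
    cases hpa : p a with
    | true =>
      constructor
      · rw [List.takeWhile_cons, List.filter_cons]
        simp [hpa, iht]
      · rw [List.dropWhile_cons, List.filter_cons]
        simp [hpa, ihd]
    | false =>
      have hall : ∀ b ∈ l, p b = false := by
        intro b hb
        cases hpb : p b with
        | false => rfl
        | true => exact absurd (h1 b hb hpb) (by simp [hpa])
      have hfil : l.filter p = [] := List.filter_eq_nil_iff.mpr (fun b hb => by simp [hall b hb])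
      have hfil2 : l.filter (fun a => !p a) = l := List.filter_eq_self.mpr (fun b hb => by simp [hall b hb])
      constructor
      · rw [List.takeWhile_cons, List.filter_cons]
        simp [hpa, hfil]
      · rw [List.dropWhile_cons, List.filter_cons]
        simp [hpa, hfil2]

theorem pvFilter_ne_split (b : Int) (pre suf : List Int)
    (hpre : ∀ p ∈ pre, p ≠ b) (hsuf : ∀ s ∈ suf, s ≠ b) :
    (pre ++ b :: suf).filter (fun i => decide (i ≠ b)) = pre ++ suf := by
  have h1 : pre.filter (fun i => decide (i ≠ b)) = pre :=
    List.filter_eq_self.mpr (fun x hx => by simpa using hpre x hx)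
  have h2 : suf.filter (fun i => decide (i ≠ b)) = suf :=
    List.filter_eq_self.mpr (fun x hx => by simpa using hsuf x hx)
  rw [List.filter_append, List.filter_cons, h1, h2]
  simp

-- A idles one tick at a time: with an empty queue and no arrival before m, nothing happens until m
theorem pvIdle (lst : List (Int × Int × Int)) (hl : lst ≠ []) :
    ∀ (k : Nat) (time m : Int), m = time + (k : Int) → (∀ l ∈ lst, m ≤ l.1) →
      solutionLoop lst [] time = solutionLoop lst [] m := by
  intro k
  induction k with
  | zero =>
    intro time m hm _
    have h0 : m = time := by omega
    rw [h0]
  | succ k ih =>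
    intro time m hm hall
    have hstep : solutionLoop lst [] time = solutionLoop lst [] (time + 1) := by
      cases hls : lst with
      | nil => exact absurd hls hl
      | cons l ls =>
        subst hls
        rw [solutionLoop.eq_def]
        rw [dif_neg (by simp)]
        have hlp : ¬ (l.1 ≤ time) := by
          have := hall l (List.mem_cons_self)
          omega
        have htw : (l :: ls).takeWhile (fun j => decide (j.1 ≤ time)) = [] := by
          rw [List.takeWhile_cons]
          simp [hlp]
        have hdw : (l :: ls).dropWhile (fun j => decide (j.1 ≤ time)) = l :: ls := by
          rw [List.dropWhile_cons]
          simp [hlp]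
        split
        · next heq => rw [hdw]
        · next q qs heq =>
          exfalso
          rw [List.nil_append, htw] at heq
          rw [show PySem.List.sorted2 ([] : List (Int × Int × Int)) (fun j => j.2.1) (fun j => j.1) = [] from rfl] at heq
          simp at heq
    rw [hstep]
    exact ih (time + 1) m (by push_cast at hm ⊢; omega) hall

theorem pvFilterNe_length_lt (l : List Int) (b : Int) (h : b ∈ l) :
    (l.filter (fun i => decide (i ≠ b))).length < l.length := by
  rcases Nat.lt_or_ge (l.filter (fun i => decide (i ≠ b))).length l.length with hlt | hge
  · exact hlt
  · exfalso
    have heq : l.filter (fun i => decide (i ≠ b)) = l := (List.filter_sublist).eq_of_length_le hge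
    have hmem2 : b ∈ l.filter (fun i => decide (i ≠ b)) := by rw [heq]; exact h
    have := List.of_mem_filter hmem2
    simp at this

-- the main simulation: related states produce the same output
theorem pvMain : ∀ (N : Nat) (t r : List Int) (lst Q : List (Int × Int × Int)) (rem : List Int) (time : Int),
    pvNu t rem time ≤ N → pvInv t r lst Q rem time →
    solutionLoop lst Q time = solutionAltLoop t r rem time := by
  intro N
  induction N with
  | zero =>
    intro t r lst Q rem time hN _
    exfalso
    unfold pvNu at hN
    cases hrem : rem with
    | nil => rw [hrem] at hN; simp at hN
    | cons a l => rw [hrem] at hN; simp [List.length_cons] at hN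
  | succ N ih =>
    intro t r lst Q rem time hN hInv
    obtain ⟨hperm, hlstP, hQP, hQtime, hLB, hremP⟩ := hInv
    by_cases hrem : rem = []
    · -- nothing left on either side
      subst hrem
      have hnil : lst ++ Q = [] := hperm.eq_nil
      obtain ⟨hl0, hQ0⟩ := List.append_eq_nil_iff.mp hnil
      rw [solutionLoop.eq_def, dif_pos ⟨hQ0, hl0⟩, solutionAltLoop.eq_def, dif_pos rfl]
    · by_cases hA0 : rem.filter (fun i => decide (PySem.List.pyGetD t i 0 ≤ time)) = []
      · -- IDLE: no job has arrived; B jumps to the next arrival m, A ticks up to it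
        have hQnil : Q = [] := by
          cases hQc : Q with
          | nil => rfl
          | cons q0 Q0 =>
            exfalso
            have hq0 : q0 ∈ lst ++ Q := by
              rw [hQc]
              exact List.mem_append_right _ (List.mem_cons_self)
            obtain ⟨i, hi, hJi⟩ := List.mem_map.mp (hperm.subset hq0)
            have hq0t : q0.1 < time := hQtime q0 (by rw [hQc]; exact List.mem_cons_self)
            have : i ∈ rem.filter (fun i => decide (PySem.List.pyGetD t i 0 ≤ time)) := by
              refine List.mem_filter.mpr ⟨hi, ?_⟩
              have : PySem.List.pyGetD t i 0 = q0.1 := by rw [← hJi]; rfl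
              simp only [decide_eq_true_eq]
              omega
            rw [hA0] at this
            simp at this
        subst hQnil
        rw [List.append_nil] at hperm
        have hlstne : lst ≠ [] := by
          intro hl0
          apply hrem
          rw [hl0] at hperm
          have := hperm.symm.eq_nil
          exact List.map_eq_nil_iff.mp this
        obtain ⟨m, hm⟩ : ∃ m, PySem.List.min? (rem.map (fun i => PySem.List.pyGetD t i 0)) (fun x => x) = some m := by
          cases hc : PySem.List.min? (rem.map (fun i => PySem.List.pyGetD t i 0)) (fun x => x) with
          | none =>
            exfalso
            have := (PySem.List.min?_eq_none_iff _ _).mp hc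
            exact hrem (List.map_eq_nil_iff.mp this)
          | some m => exact ⟨m, rfl⟩
        have hmin := PySem.List.min?_isMin hm
        obtain ⟨i0, hi0, hi0t⟩ := List.mem_map.mp (PySem.List.min?_mem hm)
        have htm : time < m := by
          by_contra hc
          have : i0 ∈ rem.filter (fun i => decide (PySem.List.pyGetD t i 0 ≤ time)) := by
            refine List.mem_filter.mpr ⟨hi0, ?_⟩
            simp only [decide_eq_true_eq]
            omega
          rw [hA0] at this
          simp at this
        have hmlb : ∀ l ∈ lst, m ≤ l.1 := by
          intro l hl
          obtain ⟨i, hi, hJi⟩ := List.mem_map.mp (hperm.subset hl)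
          have h1 : PySem.List.pyGetD t i 0 = l.1 := by rw [← hJi]; rfl
          have h2 := hmin (PySem.List.pyGetD t i 0) (List.mem_map_of_mem hi)
          simpa [h1] using h2
        have hLHS : solutionLoop lst [] time = solutionLoop lst [] m :=
          pvIdle lst hlstne (m - time).toNat time m (by omega) hmlb
        have hRHS : solutionAltLoop t r rem time = solutionAltLoop t r rem m := by
          rw [solutionAltLoop.eq_def, dif_neg hrem]
          split
          · next best heq =>
            exfalso
            rw [hA0] at heq
            rw [pvMin2?_eq_foldl] at heq
            simp at heq
          · next heq =>
            split
            · next m' heq2 =>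
              rw [hm] at heq2
              injection heq2 with heq2
              rw [heq2]
            · next heq2 =>
              exfalso
              have := (PySem.List.min?_eq_none_iff _ _).mp heq2
              exact hrem (List.map_eq_nil_iff.mp this)
        rw [hLHS, hRHS]
        refine ih t r lst [] rem m ?_ ?_
        · -- measure: the idle flag drops
          unfold pvNu at hN ⊢
          rw [if_pos hA0] at hN
          have harrm : rem.filter (fun i => decide (PySem.List.pyGetD t i 0 ≤ m)) ≠ [] := by
            intro hc
            have : i0 ∈ rem.filter (fun i => decide (PySem.List.pyGetD t i 0 ≤ m)) := by
              refine List.mem_filter.mpr ⟨hi0, ?_⟩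
              simp only [decide_eq_true_eq]
              omega
            rw [hc] at this
            simp at this
          rw [if_neg harrm]
          omega
        · exact ⟨by rw [List.append_nil]; exact hperm, hlstP, List.Pairwise.nil,
            by intro q hq; simp at hq, Or.inl rfl, hremP⟩
      · -- BUSY: some job has arrived; both sides process the (r,t,index)-minimal one
        have hguard : ¬ (Q = [] ∧ lst = []) := by
          rintro ⟨hQ0, hl0⟩
          apply hrem
          rw [hQ0, hl0] at hperm
          exact List.map_eq_nil_iff.mp (List.Perm.eq_nil hperm.symm)
        -- takeWhile/dropWhile on the (t,r,i)-sorted lst are filters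
        have hTW := pvTW (fun j : Int × Int × Int => decide (j.1 ≤ time)) lst
          (hlstP.imp (fun {a b} hab => by
            simp only [decide_eq_true_eq]
            simp only [pvLt3] at hab
            omega))
        have hQfix : Q.filter (fun j : Int × Int × Int => decide (j.1 ≤ time)) = Q :=
          List.filter_eq_self.mpr (fun q hq => by
            have := hQtime q hq
            simp only [decide_eq_true_eq]
            omega)
        -- the sorted queue is a permutation of the arrived jobs
        have hQM : (Q ++ lst.takeWhile (fun j => decide (j.1 ≤ time))).Perm
            ((rem.filter (fun i => decide (PySem.List.pyGetD t i 0 ≤ time))).map (pvJ t r)) := by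
          rw [hTW.1, ← hQfix, ← List.filter_append]
          have h1 : ((Q ++ lst).filter (fun j : Int × Int × Int => decide (j.1 ≤ time))).Perm
              ((rem.map (pvJ t r)).filter (fun j : Int × Int × Int => decide (j.1 ≤ time))) :=
            ((List.perm_append_comm).trans hperm).filter _
          have h2 : (rem.map (pvJ t r)).filter (fun j : Int × Int × Int => decide (j.1 ≤ time))
              = (rem.filter (fun i => decide (PySem.List.pyGetD t i 0 ≤ time))).map (pvJ t r) := by
            rw [List.filter_map]
            rfl
          rw [← h2]
          exact h1
        have htie : (Q ++ lst.takeWhile (fun j => decide (j.1 ≤ time))).Pairwise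
            (fun a b : Int × Int × Int => a.2.1 = b.2.1 → a.1 = b.1 → a.2.2 < b.2.2) := by
          rw [List.pairwise_append]
          refine ⟨hQP.imp (fun {a b} hab => by simp only [pvLt3] at hab; omega),
            (List.Pairwise.sublist (List.takeWhile_sublist _) hlstP).imp
              (fun {a b} hab => by simp only [pvLt3] at hab; omega),
            ?_⟩
          intro q hq mv hmv h1 h2
          exfalso
          rcases hLB with hQe | hlb
          · rw [hQe] at hq; simp at hq
          · have hmv' : mv ∈ lst := (List.takeWhile_sublist _).mem hmv
            have h3 : mv.1 ≤ time := by
              rw [hTW.1] at hmv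
              have := List.of_mem_filter hmv
              simpa using this
            have h4 := hlb mv hmv'
            have h5 := hQtime q hq
            omega
        have hQ'P := pvSorted2_pairwise (fun j : Int × Int × Int => j.2.1) (fun j => j.1) (fun j => j.2.2) _ htie
        have hQ'perm : (PySem.List.sorted2 (Q ++ lst.takeWhile (fun j => decide (j.1 ≤ time))) (fun j => j.2.1) (fun j => j.1)).Perm
            ((rem.filter (fun i => decide (PySem.List.pyGetD t i 0 ≤ time))).map (pvJ t r)) :=
          (PySem.List.sorted2_perm _ _ _ false).trans hQM
        have hQ'ne : PySem.List.sorted2 (Q ++ lst.takeWhile (fun j => decide (j.1 ≤ time))) (fun j => j.2.1) (fun j => j.1) ≠ [] := by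
          intro hc
          apply hA0
          rw [hc] at hQ'perm
          exact List.map_eq_nil_iff.mp hQ'perm.symm.eq_nil
        obtain ⟨q, qs, hQs⟩ := List.exists_cons_of_ne_nil hQ'ne
        have hqmem : q ∈ (rem.filter (fun i => decide (PySem.List.pyGetD t i 0 ≤ time))).map (pvJ t r) :=
          hQ'perm.subset (by rw [hQs]; exact List.mem_cons_self)
        obtain ⟨b, hbA, hJb⟩ := List.mem_map.mp hqmem
        have hbRem : b ∈ rem := List.mem_of_mem_filter hbA
        have hmin : ∀ y ∈ PySem.List.sorted2 (Q ++ lst.takeWhile (fun j => decide (j.1 ≤ time))) (fun j => j.2.1) (fun j => j.1),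
            y = q ∨ pvLt3 (fun j : Int × Int × Int => j.2.1) (fun j => j.1) (fun j => j.2.2) q y := by
          intro y hy
          rw [hQs] at hy hQ'P
          rw [List.pairwise_cons] at hQ'P
          rcases List.mem_cons.mp hy with rfl | hy'
          · exact Or.inl rfl
          · exact Or.inr (hQ'P.1 y hy')
        have hminA : ∀ i ∈ rem.filter (fun i => decide (PySem.List.pyGetD t i 0 ≤ time)),
            pvJ t r i = q ∨ pvLt3 (fun j : Int × Int × Int => j.2.1) (fun j => j.1) (fun j => j.2.2) q (pvJ t r i) :=
          fun i hi => hmin (pvJ t r i) (hQ'perm.mem_iff.mpr (List.mem_map_of_mem hi))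
        have hArrP : (rem.filter (fun i => decide (PySem.List.pyGetD t i 0 ≤ time))).Pairwise (· < ·) :=
          List.Pairwise.sublist (List.filter_sublist) hremP
        obtain ⟨pre, suf, hsplit⟩ := List.append_of_mem hbA
        have hps : (∀ p ∈ pre, p < b) ∧ (∀ s ∈ suf, b < s) := by
          rw [hsplit] at hArrP
          rw [List.pairwise_append] at hArrP
          obtain ⟨_, hp2, hcross⟩ := hArrP
          rw [List.pairwise_cons] at hp2
          exact ⟨fun p hp => hcross p hp b (List.mem_cons_self), hp2.1⟩
        have hminEq : PySem.List.min2? (rem.filter (fun i => decide (PySem.List.pyGetD t i 0 ≤ time)))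
            (fun i => PySem.List.pyGetD r i 0) (fun i => PySem.List.pyGetD t i 0) = some b := by
          rw [hsplit]
          refine pvMin2?_first _ _ pre suf b ?_ ?_
          · intro p hp
            have hpA : p ∈ rem.filter (fun i => decide (PySem.List.pyGetD t i 0 ≤ time)) := by
              rw [hsplit]; exact List.mem_append_left _ hp
            have hplt := hps.1 p hp
            rcases hminA p hpA with he | hlt3
            · exfalso
              have : p = b := by
                have := congrArg (fun j : Int × Int × Int => j.2.2) (he.trans hJb.symm)
                simpa [pvJ] using this
              omega
            · rw [← hJb] at hlt3
              simp only [pvLt3, pvJ] at hlt3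
              simp only [pvLt2]
              omega
          · intro s hs
            have hsA : s ∈ rem.filter (fun i => decide (PySem.List.pyGetD t i 0 ≤ time)) := by
              rw [hsplit]
              exact List.mem_append_right _ (List.mem_cons_of_mem _ hs)
            have hslt := hps.2 s hs
            rcases hminA s hsA with he | hlt3
            · exfalso
              have : s = b := by
                have := congrArg (fun j : Int × Int × Int => j.2.2) (he.trans hJb.symm)
                simpa [pvJ] using this
              omega
            · rw [← hJb] at hlt3
              simp only [pvLt3, pvJ] at hlt3
              simp only [pvLt2]
              omega
        have hq22 : q.2.2 = b := by rw [← hJb]; rfl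
        -- unfold one step on each side
        have hLHS : solutionLoop lst Q time =
            q.2.2 :: solutionLoop (lst.dropWhile (fun j => decide (j.1 ≤ time))) qs (time + 1) := by
          rw [solutionLoop.eq_def, dif_neg hguard]
          split
          · next heq =>
            exfalso
            rw [hQs] at heq
            simp at heq
          · next q' qs' heq =>
            rw [hQs] at heq
            injection heq with h1 h2
            rw [h1, h2]
        have hRHS : solutionAltLoop t r rem time =
            b :: solutionAltLoop t r (rem.filter (fun i => decide (i ≠ b))) (time + 1) := by
          rw [solutionAltLoop.eq_def, dif_neg hrem]
          split
          · next best' heq =>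
            rw [hminEq] at heq
            injection heq with heq
            rw [heq]
          · next heq =>
            exfalso
            rw [hminEq] at heq
            simp at heq
        rw [hLHS, hRHS, hq22]
        -- the new states are again related
        have hbNotPre : ∀ p ∈ pre, p ≠ b := by
          intro p hp
          have := hps.1 p hp
          omega
        have hbNotSuf : ∀ s ∈ suf, s ≠ b := by
          intro s hs
          have := hps.2 s hs
          omega
        obtain ⟨pre2, suf2, hr2⟩ := List.append_of_mem hbRem
        have hps2 : (∀ p ∈ pre2, p < b) ∧ (∀ s ∈ suf2, b < s) := by
          rw [hr2, List.pairwise_append] at hremP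
          obtain ⟨_, hp2, hcross⟩ := hremP
          rw [List.pairwise_cons] at hp2
          exact ⟨fun p hp => hcross p hp b (List.mem_cons_self), hp2.1⟩
        have hfilterRem : rem.filter (fun i => decide (i ≠ b)) = pre2 ++ suf2 := by
          rw [hr2]
          exact pvFilter_ne_split b pre2 suf2 (fun p hp => by have := hps2.1 p hp; omega)
            (fun s hs => by have := hps2.2 s hs; omega)
        have hpermRem : (rem.map (pvJ t r)).Perm (q :: (rem.filter (fun i => decide (i ≠ b))).map (pvJ t r)) := by
          rw [hfilterRem, hr2, List.map_append, List.map_cons, List.map_append, hJb]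
          exact List.perm_middle
        have hbig : ((lst.dropWhile (fun j => decide (j.1 ≤ time))) ++ qs).Perm
            ((rem.filter (fun i => decide (i ≠ b))).map (pvJ t r)) := by
          have c1 : ((lst.dropWhile (fun j => decide (j.1 ≤ time))) ++ (q :: qs)).Perm
              (q :: ((rem.filter (fun i => decide (i ≠ b))).map (pvJ t r))) := by
            have s1 : ((lst.dropWhile (fun j => decide (j.1 ≤ time))) ++ (q :: qs)).Perm
                ((lst.dropWhile (fun j => decide (j.1 ≤ time))) ++ (Q ++ lst.takeWhile (fun j => decide (j.1 ≤ time)))) :=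
              List.Perm.append_left _ (hQs ▸ PySem.List.sorted2_perm _ _ _ false)
            have s2 : ((lst.dropWhile (fun j => decide (j.1 ≤ time))) ++ (Q ++ lst.takeWhile (fun j => decide (j.1 ≤ time)))).Perm
                (lst ++ Q) := by
              refine (List.perm_append_comm).trans ?_
              rw [List.append_assoc, List.takeWhile_append_dropWhile]
              exact List.perm_append_comm
            exact (s1.trans (s2.trans (hperm.trans hpermRem)))
          have c2 : (q :: ((lst.dropWhile (fun j => decide (j.1 ≤ time))) ++ qs)).Perm
              ((lst.dropWhile (fun j => decide (j.1 ≤ time))) ++ (q :: qs)) := List.perm_middle.symm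
          exact (c2.trans c1).cons_inv
        refine congrArg (List.cons b) (ih t r _ qs _ (time + 1) ?_ ?_)
        · -- measure decreases
          unfold pvNu at hN ⊢
          rw [if_neg hA0] at hN
          have hlen := pvFilterNe_length_lt rem b hbRem
          by_cases hc : (rem.filter (fun i => decide (i ≠ b))).filter (fun i => decide (PySem.List.pyGetD t i 0 ≤ time + 1)) = []
          · rw [if_pos hc]; omega
          · rw [if_neg hc]; omega
        · refine ⟨hbig, List.Pairwise.sublist (List.dropWhile_sublist _) hlstP, ?_, ?_, ?_, ?_⟩
          · have := hQs ▸ hQ'P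
            rw [List.pairwise_cons] at this
            exact this.2
          · intro z hz
            have hzQ' : z ∈ PySem.List.sorted2 (Q ++ lst.takeWhile (fun j => decide (j.1 ≤ time))) (fun j => j.2.1) (fun j => j.1) := by
              rw [hQs]
              exact List.mem_cons_of_mem _ hz
            have hzQM : z ∈ Q ++ lst.takeWhile (fun j => decide (j.1 ≤ time)) :=
              (PySem.List.sorted2_perm _ _ _ false).subset hzQ'
            rcases List.mem_append.mp hzQM with hzQ | hzM
            · have := hQtime z hzQ
              omega
            · have : z.1 ≤ time := by
                rw [hTW.1] at hzM
                have := List.of_mem_filter hzM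
                simpa using this
              omega
          · refine Or.inr ?_
            intro l hl
            rw [hTW.2] at hl
            have := List.of_mem_filter hl
            simp only [Bool.not_eq_eq_eq_not, Bool.not_true, decide_eq_false_iff_not] at this
            omega
          · exact List.Pairwise.sublist (List.filter_sublist) hremP

-- ===== VERDICT =====
theorem solution_spec : Claim_equal_solution := by
  intro t r _ _
  show solution t r = solution_alt t r
  unfold solution solution_alt solutionBuild
  have hfst : ((PySem.List.pyRange 0 (PySem.List.len t) 1).foldl
      (fun acc i =>
        (acc.1 ++ [(PySem.List.pyGetD t i 0, PySem.List.pyGetD r i 0, i)],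
         if PySem.List.pyGetD t i 0 > acc.2 then PySem.List.pyGetD t i 0 else acc.2))
      ([], 0)).1 = (PySem.List.pyRange 0 (PySem.List.len t) 1).map (pvJ t r) := by
    rw [PySem.List.foldl_prod_mk (f := fun acc i => acc ++ [(PySem.List.pyGetD t i 0, PySem.List.pyGetD r i 0, i)])
      (g := fun acc i => if PySem.List.pyGetD t i 0 > acc then PySem.List.pyGetD t i 0 else acc)]
    rw [PySem.List.foldl_append_singleton_eq_map (f := fun i => (PySem.List.pyGetD t i 0, PySem.List.pyGetD r i 0, i))]
    rfl
  rw [hfst]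
  have hremP : (PySem.List.pyRange 0 (PySem.List.len t) 1).Pairwise (· < ·) :=
    PySem.List.pairwise_lt_pyRange_one 0 (PySem.List.len t)
  have htie0 : ((PySem.List.pyRange 0 (PySem.List.len t) 1).map (pvJ t r)).Pairwise
      (fun a b : Int × Int × Int => a.1 = b.1 → a.2.1 = b.2.1 → a.2.2 < b.2.2) := by
    rw [List.pairwise_map]
    exact hremP.imp (fun {a b} hab => fun _ _ => by simpa [pvJ] using hab)
  refine pvMain (pvNu t (PySem.List.pyRange 0 (PySem.List.len t) 1) 0) t r _ [] _ 0 (le_refl _)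
    ⟨?_, ?_, List.Pairwise.nil, by intro q hq; simp at hq, Or.inl rfl, hremP⟩
  · rw [List.append_nil]
    exact PySem.List.sorted2_perm _ _ _ false
  · exact pvSorted2_pairwise (fun j : Int × Int × Int => j.1) (fun j => j.2.1) (fun j => j.2.2) _ htie0
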